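-- pv_equiv track=rewrite | github.com/KaramGhanem/Music-Personalizer | Topic_Extractor/chat_topic_extractor.py | merge_conversations
-- ===== SOURCE A (Python) =====
-- from typing import List, Dict, Optional, Tuple
--
-- def merge_conversations(chat_history: List[Dict[str, str]], max_chunk_size: Optional[int] = None) -> List[str]:
--     # If max_chunk_size is not specified, merge all entries into one string.
--     if max_chunk_size is None:
--         return [" ".join(entry["content"] for entry in chat_history)]
--
--     merged_documents = []
--     temp_chunk = []
--     for entry in chat_history:
--         temp_chunk.append(entry["content"])  # or use preprocess_text(entry["content"]) if needed
--         if len(temp_chunk) >= max_chunk_size: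
--             merged_documents.append(" ".join(temp_chunk))
--             temp_chunk = []
--     if temp_chunk:
--         merged_documents.append(" ".join(temp_chunk))
--     return merged_documents
-- ===== SOURCE B (Python) =====
-- from typing import List, Dict, Optional
--
-- def merge_conversations(chat_history: List[Dict[str, str]], max_chunk_size: Optional[int] = None) -> List[str]:
--     contents = [entry["content"] for entry in chat_history]
--     if max_chunk_size is None:
--         return [" ".join(contents)]
--     step = max_chunk_size if max_chunk_size > 0 else 1
--     return [" ".join(contents[i:i + step]) for i in range(0, len(contents), step)]
-- ===== Notes on version B (the rewrite author's own statement) =====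
-- stated objective: simpler
-- what changed: Replaces the accumulator-and-flush loop (temp_chunk built up and emptied inside a for, plus a trailing flush) by extracting all contents first and chunking them with index-based slicing over range(0, n, step), where step=max(max_chunk_size,1) reproduces the per-entry chunking for non-positive sizes.
import Mathlib
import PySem

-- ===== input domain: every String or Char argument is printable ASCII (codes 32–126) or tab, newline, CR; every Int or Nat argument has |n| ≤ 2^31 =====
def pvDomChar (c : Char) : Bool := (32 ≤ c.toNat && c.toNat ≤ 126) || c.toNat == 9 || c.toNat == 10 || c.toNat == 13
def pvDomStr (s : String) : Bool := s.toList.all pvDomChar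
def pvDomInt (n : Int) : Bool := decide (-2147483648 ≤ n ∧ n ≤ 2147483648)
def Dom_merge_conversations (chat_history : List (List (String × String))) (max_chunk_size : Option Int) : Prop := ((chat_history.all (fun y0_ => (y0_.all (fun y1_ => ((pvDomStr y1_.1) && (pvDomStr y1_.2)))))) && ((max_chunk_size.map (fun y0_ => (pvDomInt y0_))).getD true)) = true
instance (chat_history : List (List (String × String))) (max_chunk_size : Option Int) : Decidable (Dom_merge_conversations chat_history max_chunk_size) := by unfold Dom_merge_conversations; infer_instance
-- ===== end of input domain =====

-- B extracts all contents first and chunks them by index slicing instead of A's accumulate-and-flush loop (objective: simpler decomposition).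


-- ===== PORT A =====
-- entry["content"] on the association-list encoding of the dict: first matching key.
-- The "" default is never reached under Pre_ (which requires every entry to carry the key).
def pvContent (e : List (String × String)) : String :=
  match e.find? (fun p => p.1 == "content") with
  | some p => p.2
  | none => ""

-- the body of A's for-loop: append the content to temp_chunk, flush when it reaches max_chunk_size
def pvFlush (m : Int) (st : List String × List String) (c : String) : List String × List String :=
  let temp := st.2 ++ [c]
  if m ≤ PySem.List.len temp then (st.1 ++ [PySem.Str.join " " temp], ([] : List String))
  else (st.1, temp)

def merge_conversations (chat_history : List (List (String × String))) (max_chunk_size : Option Int) : List String :=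
  match max_chunk_size with
  | none => [PySem.Str.join " " (chat_history.map (fun entry => pvContent entry))]
  | some m =>
    let st := chat_history.foldl (fun st entry => pvFlush m st (pvContent entry)) ([], [])
    if st.2 ≠ [] then st.1 ++ [PySem.Str.join " " st.2] else st.1

-- ===== PORT B =====
def merge_conversations_alt (chat_history : List (List (String × String))) (max_chunk_size : Option Int) : List String :=
  let contents := chat_history.map (fun entry => pvContent entry)
  match max_chunk_size with
  | none => [PySem.Str.join " " contents]
  | some m =>
    let step : Int := if 0 < m then m else 1
    (PySem.List.pyRange 0 (PySem.List.len contents) step).map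
      (fun i => PySem.Str.join " " (PySem.List.slice contents (some i) (some (i + step))))

-- ===== PRECONDITION & SPEC =====
-- Pre_ excludes exactly the inputs on which A raises KeyError: an entry without a "content" key.
def Pre_merge_conversations (chat_history : List (List (String × String))) (max_chunk_size : Option Int) : Prop :=
  chat_history.all (fun e => e.any (fun p => p.1 == "content")) = true
instance (chat_history : List (List (String × String))) (max_chunk_size : Option Int) : Decidable (Pre_merge_conversations chat_history max_chunk_size) := by unfold Pre_merge_conversations; infer_instance

def pvWitness_merge_conversations : (List (List (String × String))) × Option Int :=
  ([[("content", "hello"), ("role", "user")], [("content", "there")], [("content", "friend")]], some 2)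

def Spec_merge_conversations (chat_history : List (List (String × String))) (max_chunk_size : Option Int) (out : List String) : Prop := out = merge_conversations_alt chat_history max_chunk_size
instance (chat_history : List (List (String × String))) (max_chunk_size : Option Int) (out : List String) : Decidable (Spec_merge_conversations chat_history max_chunk_size out) := by unfold Spec_merge_conversations; infer_instance

-- ===== CLAIM (what is proved, stated in full; the proofs are below) =====
def Claim_equal_merge_conversations : Prop := ∀ (chat_history : List (List (String × String))) (max_chunk_size : Option Int), Dom_merge_conversations chat_history max_chunk_size → Pre_merge_conversations chat_history max_chunk_size → Spec_merge_conversations chat_history max_chunk_size (merge_conversations chat_history max_chunk_size)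

-- ===== LEMMAS AND PROOFS =====

-- chunks of size s (s ≥ 1 in use), head-first
def chunksRec (s : Nat) : List String → List String
  | [] => []
  | c :: cs => PySem.Str.join " " (c :: cs.take (s - 1)) :: chunksRec s (cs.drop (s - 1))
termination_by cs => cs.length
decreasing_by simp

-- A's loop as a recursion: temp is the pending chunk
def chunksFrom (s : Nat) : List String → List String → List String
  | temp, [] => if temp = [] then [] else [PySem.Str.join " " temp]
  | temp, c :: cs =>
    if s ≤ temp.length + 1 then PySem.Str.join " " (temp ++ [c]) :: chunksFrom s [] cs
    else chunksFrom s (temp ++ [c]) cs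

@[simp] lemma chunksRec_nil (s : Nat) : chunksRec s [] = [] := by
  simp only [chunksRec]

lemma chunksRec_cons (s : Nat) (c : String) (cs : List String) :
    chunksRec s (c :: cs) = PySem.Str.join " " (c :: cs.take (s - 1)) :: chunksRec s (cs.drop (s - 1)) := by
  simp only [chunksRec]

lemma chunksRec_ne_nil (s : Nat) (hs : 0 < s) (c : String) (cs : List String) :
    chunksRec s (c :: cs) = PySem.Str.join " " ((c :: cs).take s) :: chunksRec s ((c :: cs).drop s) := by
  obtain ⟨t, rfl⟩ := Nat.exists_eq_add_of_lt hs
  rw [chunksRec_cons]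
  simp

lemma foldA_map (m : Int) (ch : List (List (String × String))) (init : List String × List String) :
    ch.foldl (fun st entry => pvFlush m st (pvContent entry)) init
      = (ch.map (fun entry => pvContent entry)).foldl (pvFlush m) init := by
  induction ch generalizing init with
  | nil => rfl
  | cons e ch ih => simp only [List.foldl_cons, List.map_cons]; exact ih _

lemma loopA (m : Int) (s : Nat) (hsm : s = if 0 < m then m.toNat else 1) :
    ∀ (cs docs temp : List String), temp.length < s →
      (if (cs.foldl (pvFlush m) (docs, temp)).2 ≠ [] then
         (cs.foldl (pvFlush m) (docs, temp)).1 ++ [PySem.Str.join " " (cs.foldl (pvFlush m) (docs, temp)).2]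
       else (cs.foldl (pvFlush m) (docs, temp)).1)
      = docs ++ chunksFrom s temp cs := by
  intro cs
  induction cs with
  | nil =>
    intro docs temp _
    by_cases h : temp = [] <;> simp [chunksFrom, h]
  | cons c cs ih =>
    intro docs temp hlt
    have hs : 0 < s := by rcases hsm with rfl; split <;> omega
    have hcond : (m ≤ PySem.List.len (temp ++ [c])) ↔ (s ≤ temp.length + 1) := by
      simp only [PySem.List.len_eq, List.length_append, List.length_singleton]
      rcases hsm with rfl
      by_cases hm : 0 < m
      · rw [if_pos hm]; omega
      · rw [if_neg hm]; omega
    by_cases h : m ≤ PySem.List.len (temp ++ [c])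
    · have h' : s ≤ temp.length + 1 := hcond.mp h
      have hstep : pvFlush m (docs, temp) c = (docs ++ [PySem.Str.join " " (temp ++ [c])], []) := by
        simp only [pvFlush, if_pos h]
      simp only [List.foldl_cons, hstep]
      rw [ih (docs ++ [PySem.Str.join " " (temp ++ [c])]) [] hs]
      simp [chunksFrom, h', List.append_assoc]
    · have h' : ¬ s ≤ temp.length + 1 := fun hh => h (hcond.mpr hh)
      have hstep : pvFlush m (docs, temp) c = (docs, temp ++ [c]) := by
        simp only [pvFlush, if_neg h]
      simp only [List.foldl_cons, hstep]
      rw [ih docs (temp ++ [c]) (by simp; omega)]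
      simp [chunksFrom, h']

lemma chunksFrom_eq (s : Nat) (hs : 0 < s) :
    ∀ (cs temp : List String), temp.length < s →
      chunksFrom s temp cs =
        if temp = [] ∧ cs = [] then []
        else PySem.Str.join " " (temp ++ cs.take (s - temp.length)) :: chunksRec s (cs.drop (s - temp.length)) := by
  intro cs
  induction cs with
  | nil =>
    intro temp _
    by_cases h : temp = [] <;> simp [chunksFrom, h]
  | cons c cs ih =>
    intro temp hlt
    by_cases h : s ≤ temp.length + 1
    · have hse : s = temp.length + 1 := by omega
      have htail : chunksFrom s [] cs = chunksRec s cs := by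
        cases cs with
        | nil => simp [chunksFrom]
        | cons d ds =>
          rw [ih [] (by simpa using hs), chunksRec_ne_nil s hs]
          simp
      simp only [chunksFrom, if_pos h, htail]
      have h1 : s - temp.length = 1 := by omega
      simp [h1]
    · have hlen : (temp ++ [c]).length < s := by simp; omega
      rw [show chunksFrom s temp (c :: cs) = chunksFrom s (temp ++ [c]) cs by
            simp [chunksFrom, h]]
      rw [ih (temp ++ [c]) hlen]
      have h2 : s - temp.length = (s - (temp ++ [c]).length) + 1 := by simp; omega
      simp only [h2, List.take_succ_cons, List.drop_succ_cons]
      simp [List.append_assoc]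

lemma chunksFrom_nil_eq (s : Nat) (hs : 0 < s) (cs : List String) :
    chunksFrom s [] cs = chunksRec s cs := by
  cases cs with
  | nil => simp [chunksFrom]
  | cons c cs =>
    rw [chunksFrom_eq s hs _ [] (by simpa using hs), chunksRec_ne_nil s hs]
    simp

lemma pyRange_zero_cons (b : Int) (s : Nat) (hs : 0 < s) (hb : 0 < b) :
    PySem.List.pyRange 0 b (s : Int) = 0 :: (PySem.List.pyRange 0 (b - s) (s : Int)).map (· + (s : Int)) := by
  have hs' : (0 : Int) < (s : Int) := by exact_mod_cast hs
  rw [PySem.List.pyRange_of_pos 0 b hs', PySem.List.pyRange_of_pos 0 (b - s) hs']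
  have key : (b - 0 + s - 1) / s = (b - s - 0 + s - 1) / s + 1 := by
    have h : (b - 0 + s - 1) = (b - s - 0 + s - 1) + 1 * s := by ring
    rw [h, Int.add_mul_ediv_right _ _ (by omega : (s:Int) ≠ 0)]
  by_cases hbs : 0 < b - (s : Int)
  · have hq : 0 ≤ (b - s - 0 + s - 1) / s := Int.ediv_nonneg (by omega) (by omega)
    rw [if_pos hb, if_pos hbs, key]
    rw [show ((b - s - 0 + s - 1) / s + 1).toNat = ((b - s - 0 + s - 1) / s).toNat + 1 by omega]
    rw [List.range_succ_eq_map]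
    simp only [List.map_cons, List.map_map]
    refine List.cons_eq_cons.mpr ⟨by norm_num, ?_⟩
    apply List.map_congr_left
    intro k _
    simp only [Function.comp_apply]
    push_cast
    ring
  · have hz : (b - s - 0 + s - 1) / s = 0 :=
      Int.ediv_eq_zero_of_lt (by omega) (by omega)
    rw [if_pos hb, if_neg hbs, key, hz]
    simp

lemma slice_chunk (cs : List String) (a b : Int) (ha : 0 ≤ a) (hb : a ≤ b) :
    PySem.List.slice cs (some a) (some b) = (cs.drop a.toNat).take (b.toNat - a.toNat) :=
  PySem.List.slice_toNat cs (by omega) (by omega)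

lemma mapSlices (s : Nat) (hs : 0 < s) :
    ∀ (cs : List String),
      (PySem.List.pyRange 0 (PySem.List.len cs) (s : Int)).map
        (fun i => PySem.Str.join " " (PySem.List.slice cs (some i) (some (i + s)))) = chunksRec s cs := by
  have hs' : (0 : Int) < (s : Int) := by exact_mod_cast hs
  intro cs
  induction hn : cs.length using Nat.strong_induction_on generalizing cs with
  | _ n ih =>
  cases cs with
  | nil =>
    rw [show PySem.List.len ([] : List String) = 0 by simp [PySem.List.len_eq]]
    rw [PySem.List.pyRange_of_pos 0 0 hs']
    simp
  | cons c cs' =>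
    have hb : (0 : Int) < PySem.List.len (c :: cs') := by
      rw [PySem.List.len_eq, List.length_cons]
      exact_mod_cast Nat.succ_pos cs'.length
    rw [show PySem.List.len (c :: cs') = ((c :: cs').length : Int) by simp [PySem.List.len_eq]] at hb ⊢
    rw [pyRange_zero_cons _ s hs hb]
    rw [List.map_cons, List.map_map]
    rw [chunksRec_ne_nil s hs]
    refine List.cons_eq_cons.mpr ⟨?_, ?_⟩
    · -- head: slice cs 0 s = take s
      rw [show ((0 : Int) + (s : Int)) = (s : Int) by ring]
      rw [slice_chunk _ 0 s (by omega) (by omega)]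
      simp
    · -- tail
      have htail_py : ∀ i : Int, 0 ≤ i →
          PySem.List.slice (c :: cs') (some (i + s)) (some (i + s + s)) =
          PySem.List.slice ((c :: cs').drop s) (some i) (some (i + s)) := by
        intro i hi
        rw [slice_chunk _ (i + s) (i + s + s) (by omega) (by omega),
            slice_chunk _ i (i + s) (by omega) (by omega)]
        rw [List.drop_drop]
        rw [show (i + (s:Int)).toNat = s + i.toNat by omega]
        rw [show (i + (s:Int) + s).toNat - (s + i.toNat) = s by omega]
        rw [show s + i.toNat - i.toNat = s by omega]
      by_cases hcase : s < (c :: cs').length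
      · have hlen : ((c :: cs').drop s).length = (c :: cs').length - s := by simp
        have heq : ((c :: cs').length : Int) - s = (((c :: cs').drop s).length : Int) := by
          rw [hlen]; omega
        rw [heq]
        have hrec := ih (((c :: cs').drop s).length) (by rw [hlen]; omega) ((c :: cs').drop s) rfl
        rw [show PySem.List.len ((c :: cs').drop s) = ((((c :: cs').drop s).length : Nat) : Int) by simp [PySem.List.len_eq]] at hrec
        rw [← hrec]
        apply List.map_congr_left
        intro i hi
        have hi0 : 0 ≤ i := ((PySem.List.mem_pyRange_iff_of_pos hs' i).mp hi).1
        simp only [Function.comp_apply]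
        rw [htail_py i hi0]
      · -- everything fits in one chunk: both tails are empty
        have h1 : PySem.List.pyRange 0 (((c :: cs').length : Int) - s) (s : Int) = [] := by
          rw [PySem.List.pyRange_of_pos _ _ hs']
          rw [if_neg (by omega)]
          simp
        have h2 : (c :: cs').drop s = [] := List.drop_eq_nil_of_le (by omega)
        rw [h1, h2]
        simp

-- ===== VERDICT (by name: the statement is the Claim_ definition above) =====
theorem merge_conversations_spec : Claim_equal_merge_conversations := by
  intro ch mcs _dom _pre
  unfold Spec_merge_conversations
  cases mcs with
  | none => simp [merge_conversations, merge_conversations_alt]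
  | some m =>
    have hs : 0 < (if 0 < m then m.toNat else 1) := by split <;> omega
    have hstep : (if 0 < m then m else 1) = (((if 0 < m then m.toNat else 1) : Nat) : Int) := by
      by_cases hm : 0 < m
      · rw [if_pos hm, if_pos hm]; omega
      · rw [if_neg hm, if_neg hm]; norm_num
    show merge_conversations ch (some m) = merge_conversations_alt ch (some m)
    simp only [merge_conversations, merge_conversations_alt]
    rw [hstep, mapSlices _ hs, foldA_map m ch ([], []),
        loopA m _ rfl (ch.map (fun entry => pvContent entry)) [] [] hs,
        chunksFrom_nil_eq _ hs]
    simp
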